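-- pv_equiv track=rewrite | github.com/jaydeepchakraborty/DBkwik-Entity-Summarization | Summarization/nl_helpers.py | combine_conjunctive_sentences
-- ===== SOURCE A (Python) =====
-- def combine_conjunctive_sentences(sents):
--     if not sents:
--         return ''
--     string = sents[0]
--     for i in range(1, len(sents)):
--         if i == len(sents) - 1:
--             string += ' and ' + sents[i]
--         else:
--             string += ', ' + sents[i]
--     return string
-- ===== SOURCE B (Python) =====
-- def combine_conjunctive_sentences(sents):
--     if not sents:
--         return ''
--     parts = [sents[-1]]
--     sep = ' and '
--     for s in reversed(sents[:-1]):
--         parts.append(sep)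
--         parts.append(s)
--         sep = ', '
--     parts.reverse()
--     return ''.join(parts)
-- ===== Notes on version B (the rewrite author's own statement) =====
-- stated objective: alternative
-- what changed: Builds the result back-to-front: starting from the last sentence it walks the remaining sentences in reverse, emitting each with a separator state that is ' and ' at the first (rightmost) junction and ', ' afterwards, collecting parts and joining once, instead of A's forward index loop with an i==len-1 branch.
import Mathlib
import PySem

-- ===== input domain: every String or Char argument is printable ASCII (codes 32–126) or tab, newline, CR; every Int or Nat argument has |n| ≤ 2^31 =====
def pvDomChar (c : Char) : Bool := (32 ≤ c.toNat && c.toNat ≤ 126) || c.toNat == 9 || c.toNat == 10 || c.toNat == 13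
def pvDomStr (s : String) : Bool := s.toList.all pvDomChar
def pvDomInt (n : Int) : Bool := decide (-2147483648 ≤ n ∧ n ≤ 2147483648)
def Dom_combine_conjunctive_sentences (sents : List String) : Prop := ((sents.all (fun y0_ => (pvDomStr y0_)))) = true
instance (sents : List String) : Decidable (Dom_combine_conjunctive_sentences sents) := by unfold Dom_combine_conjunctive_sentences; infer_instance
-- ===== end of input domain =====

-- B builds the result back-to-front: from the last sentence it walks the rest in reverse, prepending with a separator state (' and ' first, ', ' afterwards), instead of A's forward index loop (return value only).
-- ===== PORT A =====
def combine_conjunctive_sentences (sents : List String) : String :=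
  if sents = [] then ""
  else
    let string := PySem.List.pyGetD sents 0 ""
    (PySem.List.pyRange 1 (sents.length : Int) 1).foldl
      (fun string i =>
        if i = (sents.length : Int) - 1 then
          string ++ (" and " ++ PySem.List.pyGetD sents i "")
        else
          string ++ (", " ++ PySem.List.pyGetD sents i "")) string

-- ===== PORT B =====
def combine_conjunctive_sentences_alt (sents : List String) : String :=
  if sents = [] then ""
  else
    let init : List String × String := ([PySem.List.pyGetD sents (-1) ""], " and ")
    let st := (PySem.List.slice sents none (some (-1))).reverse.foldl
      (fun (st : List String × String) s => (st.1 ++ [st.2, s], ", ")) init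
    PySem.Str.join "" st.1.reverse

-- ===== PRECONDITION & SPEC =====
def Spec_combine_conjunctive_sentences (sents : List String) (out : String) : Prop := out = combine_conjunctive_sentences_alt sents
instance (sents : List String) (out : String) : Decidable (Spec_combine_conjunctive_sentences sents out) := by unfold Spec_combine_conjunctive_sentences; infer_instance

-- ===== CLAIM (what is proved, stated in full; the proofs are below) =====
def Claim_equal_combine_conjunctive_sentences : Prop := ∀ (sents : List String), Dom_combine_conjunctive_sentences sents → Spec_combine_conjunctive_sentences sents (combine_conjunctive_sentences sents)

-- ===== LEMMAS AND PROOFS =====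

-- String append is associative (via toList).
theorem str_append_assoc (a b c : String) : a ++ b ++ c = a ++ (b ++ c) := by
  apply String.ext; simp

-- A's loop, characterised: comma-fold over the middle, then ' and ' + last.
theorem A_char (sents : List String) (h2 : 2 ≤ sents.length) :
    combine_conjunctive_sentences sents =
      (sents.dropLast.drop 1).foldl (fun acc t => acc ++ (", " ++ t))
        (PySem.List.pyGetD sents 0 "")
      ++ (" and " ++ PySem.List.pyGetD sents ((sents.length : Int) - 1) "") := by
  have h0 : sents ≠ [] := by intro h; simp [h] at h2
  have hnI : (2 : Int) ≤ (sents.length : Int) := by exact_mod_cast h2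
  simp only [combine_conjunctive_sentences, h0, if_false]
  have hsplit : PySem.List.pyRange 1 (sents.length : Int) 1 =
      PySem.List.pyRange 1 ((sents.length : Int) - 1) 1 ++ [(sents.length : Int) - 1] := by
    have := PySem.List.pyRange_one_succ_right (a := 1) (b := (sents.length : Int) - 1) (by omega)
    simpa using this
  rw [hsplit, List.foldl_append]
  simp only [List.foldl_cons, List.foldl_nil, if_pos trivial]
  congr 1
  rw [PySem.List.foldl_congr_mem _ _
    (fun acc i => acc ++ (", " ++ PySem.List.pyGetD sents.dropLast i "")) _ ?_]
  · have hlen : ((sents.length : Int) - 1) = PySem.List.len sents.dropLast := by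
      simp [PySem.List.len]; omega
    rw [hlen,
      PySem.List.foldl_pyRange_pyGetD sents.dropLast ""
        (fun acc t => acc ++ (", " ++ t)) _ (a := 1) (by norm_num)]
    norm_num
  · intro acc i hi
    rw [PySem.List.mem_pyRange_one] at hi
    have hne : i ≠ (sents.length : Int) - 1 := by omega
    show (if i = (sents.length : Int) - 1 then
        acc ++ (" and " ++ PySem.List.pyGetD sents i "")
      else acc ++ (", " ++ PySem.List.pyGetD sents i ""))
      = acc ++ (", " ++ PySem.List.pyGetD sents.dropLast i "")
    rw [if_neg hne]
    have h1' : i < ((sents.dropLast.length : Nat) : Int) := by simp; omega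
    rw [PySem.List.pyGetD_eq_getElem sents "" (by omega) (by omega),
        PySem.List.pyGetD_eq_getElem sents.dropLast "" (by omega) h1',
        List.getElem_dropLast]

-- the same backward pass with a string accumulator (proof-side intermediate form):
def ccsAcc (sents : List String) : String :=
  if sents = [] then ""
  else
    ((PySem.List.slice sents none (some (-1))).reverse.foldl
      (fun (st : String × String) s => (s ++ st.2 ++ st.1, ", "))
      (PySem.List.pyGetD sents (-1) "", " and ")).1

-- ''.join is plain concatenation, one cons at a time:
theorem join_empty_cons (x : String) (l : List String) :
    PySem.Str.join "" (x :: l) = x ++ PySem.Str.join "" l := by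
  cases l with
  | nil =>
      apply String.ext
      simp [PySem.Str.join, PySem.Chars.join, List.intercalate]
  | cons y ys =>
      apply String.ext
      simp [PySem.Str.join, PySem.Chars.join_cons_cons]

-- the list-of-parts fold, joined, equals the string-accumulator fold:
theorem parts_fold_eq_str_fold (ws : List String) (ps : List String) (sep : String) :
    PySem.Str.join ""
        (ws.foldl (fun (st : List String × String) s => (st.1 ++ [st.2, s], ", "))
          (ps, sep)).1.reverse
      = (ws.foldl (fun (st : String × String) s => (s ++ st.2 ++ st.1, ", "))
          (PySem.Str.join "" ps.reverse, sep)).1 := by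
  induction ws generalizing ps sep with
  | nil => rfl
  | cons w ws ih =>
      simp only [List.foldl_cons]
      rw [ih]
      congr 2
      rw [show (ps ++ [sep, w]).reverse = w :: sep :: ps.reverse by simp,
          join_empty_cons, join_empty_cons, ← str_append_assoc]

-- B equals the string-accumulator form:
theorem alt_eq_ccsAcc (sents : List String) :
    combine_conjunctive_sentences_alt sents = ccsAcc sents := by
  by_cases h0 : sents = []
  · simp [combine_conjunctive_sentences_alt, ccsAcc, h0]
  · simp only [combine_conjunctive_sentences_alt, ccsAcc, h0, if_false]
    rw [parts_fold_eq_str_fold]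
    congr 2
    rw [show ([PySem.List.pyGetD sents (-1) ""] : List String).reverse
          = [PySem.List.pyGetD sents (-1) ""] by simp,
        join_empty_cons]
    refine Prod.ext ?_ rfl
    apply String.ext
    simp [PySem.Str.join, PySem.Chars.join, List.intercalate]

-- B's pair-state fold, after the first step the separator is ', ' forever:
theorem B_pairfold (ws : List String) (a : String) :
    ws.foldl (fun (st : String × String) s => (s ++ st.2 ++ st.1, ", ")) (a, ", ")
      = (ws.foldl (fun acc s => s ++ ", " ++ acc) a, ", ") := by
  induction ws generalizing a with
  | nil => rfl
  | cons w ws ih => simp only [List.foldl_cons]; exact ih _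

-- fold of prepend over a reverse = foldr of prepend:
theorem foldl_reverse_prepend (vs : List String) (a : String) :
    vs.reverse.foldl (fun acc s => s ++ ", " ++ acc) a
      = vs.foldr (fun s acc => s ++ ", " ++ acc) a := by
  simp [List.foldl_reverse]

-- foldl of append pulls a constant prefix out front:
theorem foldl_append_prefix (zs : List String) (p a : String) :
    zs.foldl (fun acc t => acc ++ (", " ++ t)) (p ++ a)
      = p ++ zs.foldl (fun acc t => acc ++ (", " ++ t)) a := by
  induction zs generalizing a with
  | nil => rfl
  | cons z zs ih =>
      simp only [List.foldl_cons]
      rw [str_append_assoc p a (", " ++ z), ih]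

-- foldr of prepend vs foldl of append:
theorem foldr_prepend_eq_foldl (zs : List String) (x b : String) :
    (x :: zs).foldr (fun s acc => s ++ ", " ++ acc) b
      = zs.foldl (fun acc t => acc ++ (", " ++ t)) x ++ (", " ++ b) := by
  induction zs generalizing x with
  | nil => simp [str_append_assoc]
  | cons z zs ih =>
      simp only [List.foldr_cons] at *
      rw [ih z, List.foldl_cons, ← str_append_assoc x ", " z,
          foldl_append_prefix zs (x ++ ", ") z]
      simp [str_append_assoc]

-- the middle of B's backward pass, over a generic nonempty middle list:
theorem B_mid (d : List String) (hd : d ≠ []) (L : String) :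
    d.dropLast.foldr (fun s acc => s ++ ", " ++ acc) (d.getLast hd ++ " and " ++ L)
      = (d.drop 1).foldl (fun acc t => acc ++ (", " ++ t)) (PySem.List.pyGetD d 0 "")
        ++ (" and " ++ L) := by
  match d with
  | x :: zs =>
    rcases zs.eq_nil_or_concat with hnil | ⟨zs', w, hw⟩
    · subst hnil
      simp [str_append_assoc, PySem.List.pyGetD_zero_cons]
    · subst hw
      simp only [List.concat_eq_append]
      have hzne : zs' ++ [w] ≠ [] := by simp
      rw [show (x :: (zs' ++ [w])).getLast (by simp) = w by
            rw [List.getLast_cons hzne]; simp,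
          show (x :: (zs' ++ [w])).dropLast = x :: zs' by
            simpa using List.dropLast_concat (l₁ := x :: zs'),
          foldr_prepend_eq_foldl, List.drop_one, List.tail_cons,
          List.foldl_append]
      simp [PySem.List.pyGetD_zero_cons, str_append_assoc]

-- B characterised on lists of length ≥ 2:
theorem B_char (sents : List String) (h2 : 2 ≤ sents.length) :
    ccsAcc sents =
      (sents.dropLast.drop 1).foldl (fun acc t => acc ++ (", " ++ t))
        (PySem.List.pyGetD sents 0 "")
      ++ (" and " ++ PySem.List.pyGetD sents ((sents.length : Int) - 1) "") := by
  have h0 : sents ≠ [] := by intro h; simp [h] at h2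
  simp only [ccsAcc, h0, if_false, PySem.List.slice_to_neg_one]
  have hd0 : sents.dropLast ≠ [] := by
    intro h; have := congrArg List.length h; simp at this; omega
  -- peel the first (reversed) step: it consumes the last middle element with ' and '
  rw [show sents.dropLast.reverse
        = sents.dropLast.getLast hd0 :: (sents.dropLast.dropLast).reverse by
      conv_lhs => rw [← List.dropLast_append_getLast hd0]
      simp]
  simp only [List.foldl_cons]
  rw [B_pairfold, foldl_reverse_prepend]
  have hlast : PySem.List.pyGetD sents (-1) "" = PySem.List.pyGetD sents ((sents.length : Int) - 1) "" := by
    rw [PySem.List.pyGetD_neg_one sents "" h0,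
        PySem.List.pyGetD_eq_getElem sents "" (by omega) (by omega),
        List.getLast_eq_getElem]
    congr 1
    omega
  have hhead : PySem.List.pyGetD sents 0 "" = PySem.List.pyGetD sents.dropLast 0 "" := by
    rw [PySem.List.pyGetD_eq_getElem sents "" (by omega) (by omega),
        PySem.List.pyGetD_eq_getElem sents.dropLast "" (by omega) (by simp; omega),
        List.getElem_dropLast]
  simp only [hlast, hhead]
  exact B_mid sents.dropLast hd0 _

theorem ccs_eq_alt (sents : List String) :
    combine_conjunctive_sentences sents = combine_conjunctive_sentences_alt sents := by
  by_cases h0 : sents = []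
  · simp [combine_conjunctive_sentences, combine_conjunctive_sentences_alt, h0]
  by_cases h1 : sents.length = 1
  · rcases sents with _ | ⟨x, rest⟩
    · simp at h0
    · have : rest = [] := by simpa using h1
      subst this
      rw [alt_eq_ccsAcc]
      simp [combine_conjunctive_sentences, ccsAcc,
        PySem.List.pyRange_one_eq_nil, PySem.List.slice_to_neg_one,
        PySem.List.pyGetD_zero_cons, PySem.List.pyGetD_neg_one]
  have h2 : 2 ≤ sents.length := by
    rcases Nat.lt_or_ge sents.length 2 with h | h
    · interval_cases h' : sents.length <;> simp_all
    · exact h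
  rw [A_char sents h2, alt_eq_ccsAcc sents, B_char sents h2]

-- ===== VERDICT (by name: the statement is the Claim_ definition above) =====
theorem combine_conjunctive_sentences_spec : Claim_equal_combine_conjunctive_sentences := by
  intro sents _
  exact ccs_eq_alt sents
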